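-- pv_equiv track=rewrite | github.com/linkouth/acm-univer | anagramm.py | get_first_lower_than
-- ===== SOURCE A (Python) =====
-- def get_first_lower_than(dict, num):
--     for key in dict:
--         if key < num and dict[key] > 0:
--             dict[key] = dict[key] - 1
--             return key
--     for key in dict:
--         if key > num and dict[key] > 0:
--             dict[key] = dict[key] - 1
--             return key
-- ===== SOURCE B (Python) =====
-- def get_first_lower_than(dict, num):
--     # Single pass: return the first key below num with a positive count immediately;
--     # remember the first key above num as a deferred fallback, decremented only if used.
--     # Like A, decrements the returned key's count in place (return value is what is proved).
--     fallback = None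
--     for key, cnt in dict.items():
--         if cnt > 0:
--             if key < num:
--                 dict[key] = cnt - 1
--                 return key
--             if fallback is None and key > num:
--                 fallback = key
--     if fallback is not None:
--         dict[fallback] -= 1
--         return fallback
--     return None
-- ===== Notes on version B (the rewrite author's own statement) =====
-- stated objective: alternative
-- what changed: Replaces A's two full scans over the dict by a single pass that returns a below-key immediately and carries the first above-key as a deferred fallback candidate, decremented only if actually returned.
import Mathlib
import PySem

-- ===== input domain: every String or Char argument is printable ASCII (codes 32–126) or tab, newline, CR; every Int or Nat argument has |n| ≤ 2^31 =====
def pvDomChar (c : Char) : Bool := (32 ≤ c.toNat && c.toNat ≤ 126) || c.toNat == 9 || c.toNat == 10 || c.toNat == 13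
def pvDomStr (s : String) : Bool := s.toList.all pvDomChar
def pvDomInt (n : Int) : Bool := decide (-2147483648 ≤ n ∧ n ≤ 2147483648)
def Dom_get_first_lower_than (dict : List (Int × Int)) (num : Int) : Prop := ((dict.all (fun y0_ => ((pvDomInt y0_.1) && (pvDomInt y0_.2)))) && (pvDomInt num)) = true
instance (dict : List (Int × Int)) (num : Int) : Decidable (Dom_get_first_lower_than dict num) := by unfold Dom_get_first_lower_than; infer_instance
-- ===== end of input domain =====

-- ===== PORT A =====
-- B changes: one pass with a deferred fallback instead of A's two scans (return value only;
-- both Pythons also decrement the returned key in place, identically).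
-- The Python argument is a dict: the association list is normalised to Python dict
-- semantics (duplicate keys keep first position, last value) via PySem.Dict.ofList;
-- keys of the Dict are unique, so dict[key] inside the loop is the pair's own value.

-- first loop of A: first key < num with positive count
def pvLoopBelow (items : List (Int × Int)) (num : Int) : Option Int :=
  match items with
  | [] => none
  | (k, v) :: rest => if k < num ∧ v > 0 then some k else pvLoopBelow rest num

-- second loop of A: first key > num with positive count
def pvLoopAbove (items : List (Int × Int)) (num : Int) : Option Int :=
  match items with
  | [] => none
  | (k, v) :: rest => if k > num ∧ v > 0 then some k else pvLoopAbove rest num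

def get_first_lower_than (dict : List (Int × Int)) (num : Int) : Option Int :=
  let items := (PySem.Dict.ofList dict).items
  match pvLoopBelow items num with
  | some k => some k
  | none => pvLoopAbove items num

-- ===== PORT B =====
-- single pass of Source B, carrying the deferred fallback (first above-key seen)
def pvOnePass (items : List (Int × Int)) (num : Int) (fallback : Option Int) : Option Int :=
  match items with
  | [] => fallback
  | (k, v) :: rest =>
    if v > 0 ∧ k < num then some k
    else if v > 0 ∧ k > num ∧ fallback = none then pvOnePass rest num (some k)
    else pvOnePass rest num fallback

def get_first_lower_than_alt (dict : List (Int × Int)) (num : Int) : Option Int :=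
  pvOnePass (PySem.Dict.ofList dict).items num none

-- ===== PRECONDITION & SPEC =====
def Spec_get_first_lower_than (dict : List (Int × Int)) (num : Int) (out : Option Int) : Prop := out = get_first_lower_than_alt dict num
instance (dict : List (Int × Int)) (num : Int) (out : Option Int) : Decidable (Spec_get_first_lower_than dict num out) := by unfold Spec_get_first_lower_than; infer_instance

-- ===== CLAIM (what is proved, stated in full; the proofs are below) =====
def Claim_equal_get_first_lower_than : Prop := ∀ (dict : List (Int × Int)) (num : Int), Dom_get_first_lower_than dict num → Spec_get_first_lower_than dict num (get_first_lower_than dict num)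

-- ===== LEMMAS AND PROOFS =====

-- invariant of B's single pass: a below-key found later still wins; otherwise the saved
-- fallback (seen earlier) beats any above-key in the remainder
theorem pvOnePass_eq (items : List (Int × Int)) (num : Int) (fallback : Option Int) :
    pvOnePass items num fallback =
      match pvLoopBelow items num with
      | some k => some k
      | none => match fallback with
                | some f => some f
                | none => pvLoopAbove items num := by
  induction items generalizing fallback with
  | nil => cases fallback <;> simp [pvOnePass, pvLoopBelow, pvLoopAbove]
  | cons p rest ih =>
    obtain ⟨k, v⟩ := p
    simp only [pvOnePass, pvLoopBelow, pvLoopAbove]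
    by_cases h1 : v > 0 ∧ k < num
    · rw [if_pos h1, if_pos (show k < num ∧ v > 0 from ⟨h1.2, h1.1⟩)]
    · rw [if_neg h1, if_neg (show ¬ (k < num ∧ v > 0) from fun hc => h1 ⟨hc.2, hc.1⟩)]
      by_cases h2 : v > 0 ∧ k > num ∧ fallback = none
      · rw [if_pos h2, if_pos (show k > num ∧ v > 0 from ⟨h2.2.1, h2.1⟩), ih, h2.2.2]
      · rw [if_neg h2, ih]
        by_cases h3 : k > num ∧ v > 0
        · rw [if_pos h3]
          obtain ⟨f, rfl⟩ : ∃ f, fallback = some f := by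
            cases fallback with
            | none => exact absurd ⟨h3.2, h3.1, rfl⟩ h2
            | some f => exact ⟨f, rfl⟩
          cases pvLoopBelow rest num <;> simp
        · rw [if_neg h3]

-- ===== VERDICT (by name: the statement is the Claim_ definition above) =====
theorem get_first_lower_than_spec : Claim_equal_get_first_lower_than := by
  intro dict num _
  unfold Spec_get_first_lower_than get_first_lower_than get_first_lower_than_alt
  rw [pvOnePass_eq]
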